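-- pv_equiv track=rewrite | github.com/atully115/CSE-174 | week10/class_assignment_10a.py | multiply_helper4
-- ===== SOURCE A (Python) =====
-- def multiply_helper4(n:int, result:int):
--     if n == 0:
--         return result
--     digit = n % 10
--     if digit > 4:
--             if result > 0:
--                 return multiply_helper4(n // 10, result * digit)
--             else:
--                 return multiply_helper4(n // 10, digit)
--     return multiply_helper4(n // 10, result)
-- ===== SOURCE B (Python) =====
-- def multiply_helper4(n: int, result: int):
--     # Compute the product of digits > 4 once, then combine with result at the end.
--     p = 1
--     any_big = False
--     m = n
--     while m != 0:
--         d = m % 10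
--         if d > 4:
--             p *= d
--             any_big = True
--         m //= 10
--     if not any_big:
--         return result
--     return result * p if result > 0 else p
-- ===== Notes on version B (the rewrite author's own statement) =====
-- stated objective: alternative
-- what changed: B replaces A's recursion that threads and conditionally re-initializes the result accumulator with a single loop that accumulates the product of digits > 4 (plus a found-flag) independently and combines it with result once at the end.
import Mathlib
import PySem

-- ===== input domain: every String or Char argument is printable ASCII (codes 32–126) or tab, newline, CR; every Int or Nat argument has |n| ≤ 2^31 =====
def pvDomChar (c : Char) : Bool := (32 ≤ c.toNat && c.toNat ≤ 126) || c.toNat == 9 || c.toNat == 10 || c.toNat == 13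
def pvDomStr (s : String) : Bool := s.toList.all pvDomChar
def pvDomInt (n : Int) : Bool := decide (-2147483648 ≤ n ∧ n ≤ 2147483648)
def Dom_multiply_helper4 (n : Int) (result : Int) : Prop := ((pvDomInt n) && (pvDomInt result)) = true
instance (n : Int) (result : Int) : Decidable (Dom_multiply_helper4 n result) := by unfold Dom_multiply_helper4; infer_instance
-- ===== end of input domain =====

-- B computes the product of digits > 4 in one loop and combines it with result once at the end,
-- instead of A's recursion that threads result and conditionally re-initializes it (alternative decomposition).


-- termination helper for both recursions (cited by name in decreasing_by)
theorem pv_fd10_lt (n : Int) (h : 0 < n) : (PySem.Int.floordiv n 10).toNat < n.toNat := by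
  rw [PySem.Int.floordiv_eq_ediv_of_pos (by omega)]
  omega

-- ===== PORT A =====
-- literal transliteration of A; for n < 0 Python's recursion never reaches 0 (RecursionError),
-- excluded by Pre_; the 'n < 0' guard only makes the Lean recursion total.
def multiply_helper4 (n : Int) (result : Int) : Int :=
  if n == 0 then result
  else if n < 0 then result
  else
    let digit := PySem.Int.mod n 10
    if digit > 4 then
      if result > 0 then multiply_helper4 (PySem.Int.floordiv n 10) (result * digit)
      else multiply_helper4 (PySem.Int.floordiv n 10) digit
    else multiply_helper4 (PySem.Int.floordiv n 10) result
termination_by n.toNat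
decreasing_by all_goals (simp only [beq_iff_eq] at *; exact pv_fd10_lt n (by omega))

-- ===== PORT B =====
-- the while-loop of Source B as a tail recursion over the state (p, any_big);
-- the 'm < 0' guard only makes it total (Python's loop never terminates there; excluded by Pre_).
def mh4Loop (m : Int) (p : Int) (anyBig : Bool) : Int × Bool :=
  if m == 0 then (p, anyBig)
  else if m < 0 then (p, anyBig)
  else
    let d := PySem.Int.mod m 10
    if d > 4 then mh4Loop (PySem.Int.floordiv m 10) (p * d) true
    else mh4Loop (PySem.Int.floordiv m 10) p anyBig
termination_by m.toNat
decreasing_by all_goals (simp only [beq_iff_eq] at *; exact pv_fd10_lt m (by omega))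

def multiply_helper4_alt (n : Int) (result : Int) : Int :=
  let st := mh4Loop n 1 false
  if !st.2 then result
  else if result > 0 then result * st.1 else st.1

-- ===== PRECONDITION & SPEC =====
-- Pre_ excludes n < 0, on which Python A raises RecursionError (n // 10 never reaches 0).
def Pre_multiply_helper4 (n : Int) (result : Int) : Prop := 0 ≤ n
instance (n : Int) (result : Int) : Decidable (Pre_multiply_helper4 n result) := by unfold Pre_multiply_helper4; infer_instance
def pvWitness_multiply_helper4 : Int × Int := (567, 0)
def Spec_multiply_helper4 (n : Int) (result : Int) (out : Int) : Prop := out = multiply_helper4_alt n result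
instance (n : Int) (result : Int) (out : Int) : Decidable (Spec_multiply_helper4 n result out) := by unfold Spec_multiply_helper4; infer_instance

-- ===== CLAIM (what is proved, stated in full; the proofs are below) =====
def Claim_equal_multiply_helper4 : Prop := ∀ (n : Int) (result : Int), Dom_multiply_helper4 n result → Pre_multiply_helper4 n result → Spec_multiply_helper4 n result (multiply_helper4 n result)

-- ===== LEMMAS AND PROOFS =====

-- product of the digits > 4 of m, and whether any exists
def mh4P (m : Int) : Int :=
  if h : 0 < m then
    (if PySem.Int.mod m 10 > 4 then PySem.Int.mod m 10 else 1) * mh4P (PySem.Int.floordiv m 10)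
  else 1
termination_by m.toNat
decreasing_by exact pv_fd10_lt m h

def mh4H (m : Int) : Bool :=
  if h : 0 < m then
    decide (PySem.Int.mod m 10 > 4) || mh4H (PySem.Int.floordiv m 10)
  else false
termination_by m.toNat
decreasing_by exact pv_fd10_lt m h

theorem mh4P_pos_eq (m : Int) (h : 0 < m) :
    mh4P m = (if m % 10 > 4 then m % 10 else 1) * mh4P (m / 10) := by
  rw [mh4P, dif_pos h, PySem.Int.mod_eq_emod_of_pos (by omega : (0:Int) < 10),
    PySem.Int.floordiv_eq_ediv_of_pos (by omega : (0:Int) < 10)]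

theorem mh4P_nonpos (m : Int) (h : ¬ 0 < m) : mh4P m = 1 := by
  rw [mh4P, dif_neg h]

theorem mh4H_pos_eq (m : Int) (h : 0 < m) :
    mh4H m = (decide (m % 10 > 4) || mh4H (m / 10)) := by
  rw [mh4H, dif_pos h, PySem.Int.mod_eq_emod_of_pos (by omega : (0:Int) < 10),
    PySem.Int.floordiv_eq_ediv_of_pos (by omega : (0:Int) < 10)]

theorem mh4H_nonpos (m : Int) (h : ¬ 0 < m) : mh4H m = false := by
  rw [mh4H, dif_neg h]

theorem mh4Loop_eq_aux : ∀ (k : Nat) (m : Int), m.toNat ≤ k → 0 ≤ m →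
    ∀ p b, mh4Loop m p b = (p * mh4P m, b || mh4H m) := by
  intro k
  induction k with
  | zero =>
    intro m hk hm p b
    have h0 : m = 0 := by omega
    rw [mh4Loop]
    simp [h0, mh4P_nonpos 0 (by omega), mh4H_nonpos 0 (by omega)]
  | succ k ih =>
    intro m hk hm p b
    rw [mh4Loop]
    by_cases h0 : m = 0
    · simp [h0, mh4P_nonpos 0 (by omega), mh4H_nonpos 0 (by omega)]
    · have hpos : 0 < m := by omega
      have hlt := pv_fd10_lt m hpos
      rw [PySem.Int.mod_eq_emod_of_pos (by omega : (0:Int) < 10),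
        PySem.Int.floordiv_eq_ediv_of_pos (by omega : (0:Int) < 10)] at *
      simp only [beq_iff_eq, if_neg h0, if_neg (by omega : ¬ m < 0)]
      rw [mh4P_pos_eq m hpos, mh4H_pos_eq m hpos]
      by_cases hd : m % 10 > 4
      · rw [if_pos hd, ih _ (by omega) (by omega), if_pos hd]
        refine congrArg₂ Prod.mk (by ring) (by simp [hd])
      · rw [if_neg hd, ih _ (by omega) (by omega), if_neg hd, one_mul]
        refine congrArg₂ Prod.mk rfl (by simp [hd])

theorem mh4Loop_eq (m : Int) (hm : 0 ≤ m) : ∀ p b, mh4Loop m p b = (p * mh4P m, b || mh4H m) :=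
  mh4Loop_eq_aux m.toNat m (le_refl _) hm

theorem mh4P_of_not_H_aux : ∀ (k : Nat) (m : Int), m.toNat ≤ k → mh4H m = false → mh4P m = 1 := by
  intro k
  induction k with
  | zero =>
    intro m hk _
    by_cases hpos : 0 < m
    · omega
    · exact mh4P_nonpos m hpos
  | succ k ih =>
    intro m hk h
    by_cases hpos : 0 < m
    · rw [mh4H_pos_eq m hpos] at h
      simp only [Bool.or_eq_false_iff, decide_eq_false_iff_not] at h
      have hlt := pv_fd10_lt m hpos
      rw [PySem.Int.floordiv_eq_ediv_of_pos (by omega : (0:Int) < 10)] at hlt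
      rw [mh4P_pos_eq m hpos, if_neg h.1, ih _ (by omega) h.2, one_mul]
    · exact mh4P_nonpos m hpos

theorem mh4P_of_not_H (m : Int) (h : mh4H m = false) : mh4P m = 1 :=
  mh4P_of_not_H_aux m.toNat m (le_refl _) h

theorem mh4A_char_aux : ∀ (k : Nat) (m : Int), m.toNat ≤ k → 0 ≤ m → ∀ result,
    multiply_helper4 m result =
      (if mh4H m then (if result > 0 then result * mh4P m else mh4P m) else result) := by
  intro k
  induction k with
  | zero =>
    intro m hk hm result
    have h0 : m = 0 := by omega
    rw [multiply_helper4]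
    simp [h0, mh4H_nonpos 0 (by omega)]
  | succ k ih =>
    intro m hk hm result
    rw [multiply_helper4]
    by_cases h0 : m = 0
    · simp [h0, mh4H_nonpos 0 (by omega)]
    · have hpos : 0 < m := by omega
      have hlt := pv_fd10_lt m hpos
      rw [PySem.Int.mod_eq_emod_of_pos (by omega : (0:Int) < 10),
        PySem.Int.floordiv_eq_ediv_of_pos (by omega : (0:Int) < 10)] at *
      have hfd : (0:Int) ≤ m / 10 := by omega
      have hmod : 0 ≤ m % 10 := by omega
      simp only [beq_iff_eq, if_neg h0, if_neg (by omega : ¬ m < 0)]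
      rw [mh4P_pos_eq m hpos, mh4H_pos_eq m hpos]
      by_cases hd : m % 10 > 4
      · rw [if_pos hd]
        have hdt : decide (m % 10 > 4) = true := by simp [hd]
        rw [hdt, Bool.true_or, if_pos hd, if_pos rfl]
        by_cases hr : result > 0
        · rw [if_pos hr, ih _ (by omega) hfd]
          have hrp : result * (m % 10) > 0 := mul_pos hr (by omega)
          by_cases hH : mh4H (m / 10) = true
          · rw [if_pos hH, if_pos hrp, if_pos hr]; ring
          · rw [if_neg hH, mh4P_of_not_H _ (by simpa using hH), if_pos hr]; ring
        · rw [if_neg hr, ih _ (by omega) hfd]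
          have hdp : m % 10 > 0 := by omega
          by_cases hH : mh4H (m / 10) = true
          · rw [if_pos hH, if_pos hdp, if_neg hr]
          · rw [if_neg hH, mh4P_of_not_H _ (by simpa using hH), mul_one, if_neg hr]
      · rw [if_neg hd]
        have hdf : decide (m % 10 > 4) = false := by simp [hd]
        rw [hdf, Bool.false_or, if_neg hd, one_mul]
        exact ih _ (by omega) hfd result

theorem mh4A_char (m : Int) (hm : 0 ≤ m) : ∀ result,
    multiply_helper4 m result =
      (if mh4H m then (if result > 0 then result * mh4P m else mh4P m) else result) :=
  mh4A_char_aux m.toNat m (le_refl _) hm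

-- ===== VERDICT (by name: the statement is the Claim_ definition above) =====
theorem multiply_helper4_spec : Claim_equal_multiply_helper4 := by
  intro n result _ hpre
  unfold Spec_multiply_helper4 multiply_helper4_alt
  rw [mh4Loop_eq n hpre, mh4A_char n hpre]
  simp only [one_mul, Bool.false_or]
  by_cases hH : mh4H n <;> simp [hH]
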